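-- pv_equiv track=rewrite | github.com/pypi-data/pypi-mirror-176 | packages/ParserLexicalAnalyzer/ParserLexicalAnalyzer-1.1.1-py3-none-any.whl/ParserLexicalAnalyzer/PropertyParser/LexicalAnalyzer.py | isUnaryOperator
-- ===== SOURCE A (Python) =====
-- def isUnaryOperator(string):
--     st = 0
--     for i in range(0, len(string)):
--         if st == 0:
--             if string[i] == '!':
--                 st = 1
--             else:
--                 return False
--         elif st == 1:
--             if string[i] == '=':
--                 return False
--             else:
--                 return True
--     return False
-- ===== SOURCE B (Python) =====
-- def isUnaryOperator(string):
--     return len(string) >= 2 and string[0] == '!' and string[1] != '='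
-- ===== Notes on version B (the rewrite author's own statement) =====
-- stated objective: simpler
-- what changed: Replaces the two-state scanning loop with a single closed-form boolean expression over the first two characters (the rest of the string never mattered).
import Mathlib
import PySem

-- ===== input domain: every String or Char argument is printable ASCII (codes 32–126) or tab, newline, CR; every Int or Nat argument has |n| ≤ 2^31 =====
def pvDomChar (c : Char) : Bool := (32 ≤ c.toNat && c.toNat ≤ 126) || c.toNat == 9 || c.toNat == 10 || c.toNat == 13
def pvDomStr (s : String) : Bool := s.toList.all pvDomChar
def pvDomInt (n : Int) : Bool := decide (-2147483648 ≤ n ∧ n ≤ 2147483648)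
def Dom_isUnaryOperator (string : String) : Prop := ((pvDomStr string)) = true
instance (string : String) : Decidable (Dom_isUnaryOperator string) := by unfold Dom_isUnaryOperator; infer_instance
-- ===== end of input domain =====

-- B replaces A's two-state scanning loop by one closed-form boolean test on the first two characters (objective: simpler).

-- ===== PORT A =====
-- the for-loop over the characters with state st, early returns modelled by returning the Bool
def isUnaryOperatorLoop : List Char → Int → Bool
  | [], _ => false                                    -- loop finishes: return False
  | c :: rest, st =>
    if st = 0 then
      (if c = '!' then isUnaryOperatorLoop rest 1 else false)
    else if st = 1 then
      (if c = '=' then false else true)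
    else isUnaryOperatorLoop rest st

def isUnaryOperator (string : String) : Bool :=
  isUnaryOperatorLoop string.toList 0

-- ===== PORT B =====
-- len(string) >= 2 and string[0] == '!' and string[1] != '='  (short-circuit via getD: guard ensures indices exist)
def isUnaryOperator_alt (string : String) : Bool :=
  let l := string.toList
  decide (2 ≤ l.length) && decide (l.getD 0 ' ' = '!') && decide (l.getD 1 ' ' ≠ '=')

-- ===== PRECONDITION & SPEC =====
def Spec_isUnaryOperator (string : String) (out : Bool) : Prop := out = isUnaryOperator_alt string
instance (string : String) (out : Bool) : Decidable (Spec_isUnaryOperator string out) := by unfold Spec_isUnaryOperator; infer_instance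

-- ===== CLAIM (what is proved, stated in full; the proofs are below) =====
def Claim_equal_isUnaryOperator : Prop := ∀ (string : String), Dom_isUnaryOperator string → Spec_isUnaryOperator string (isUnaryOperator string)

-- ===== LEMMAS AND PROOFS =====
theorem isUnaryOperator_eq_alt (s : String) :
    isUnaryOperator s = isUnaryOperator_alt s := by
  unfold isUnaryOperator isUnaryOperator_alt
  match h : s.toList with
  | [] => simp [isUnaryOperatorLoop]
  | [a] =>
    by_cases ha : a = '!' <;> simp [isUnaryOperatorLoop, ha]
  | a :: b :: rest =>
    by_cases ha : a = '!' <;> by_cases hb : b = '=' <;>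
      simp [isUnaryOperatorLoop, ha, hb]

-- ===== VERDICT (by name: the statement is the Claim_ definition above) =====
theorem isUnaryOperator_spec : Claim_equal_isUnaryOperator := by
  intro s _
  unfold Spec_isUnaryOperator
  exact isUnaryOperator_eq_alt s
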